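-- pv_equiv track=rewrite | github.com/arpanauts/biomapper | biomapper/core/strategy_actions/resolve_and_match_forward.py | _handle_composites_with_mapping
-- ===== SOURCE A (Python) =====
-- from typing import Dict, Any, List, Set
-- from collections import defaultdict
--
-- def _handle_composites_with_mapping(
--
--     identifiers: List[str],
--     strategy: str = 'split_and_match'
-- ) -> tuple[List[str], Dict[str, List[str]]]:
--     """
--     Handle composite identifiers according to strategy, maintaining mapping.
--
--     Args:
--         identifiers: List of potentially composite identifiers
--         strategy: How to handle composites
--             - 'split_and_match': Split and include components
--             - 'match_whole': Keep composites as-is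
--             - 'both': Include both composite and components
--
--     Returns:
--         Tuple of (expanded list of identifiers, mapping from expanded to original)
--     """
--     if strategy == 'match_whole':
--         return identifiers, {id: [id] for id in identifiers}
--
--     expanded = []
--     mapping = defaultdict(list)  # Expanded ID -> list of original IDs
--     delimiter = '_'  # Standard composite delimiter
--
--     for identifier in identifiers:
--         # Always include original in mapping
--         if strategy == 'both' or delimiter not in identifier:
--             expanded.append(identifier)
--             mapping[identifier].append(identifier)
--
--         # Add components if composite
--         if delimiter in identifier and strategy in ('split_and_match', 'both'):
--             components = identifier.split(delimiter)
--             for component in components: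
--                 if component:  # Skip empty components
--                     expanded.append(component)
--                     mapping[component].append(identifier)
--
--     # Remove duplicates while preserving order
--     seen = set()
--     result = []
--     final_mapping = {}
--
--     for item in expanded:
--         if item not in seen:
--             seen.add(item)
--             result.append(item)
--             final_mapping[item] = mapping[item]
--
--     return result, final_mapping
-- ===== SOURCE B (Python) =====
-- from typing import Dict, List
--
--
-- def _handle_composites_with_mapping(
--     identifiers: List[str],
--     strategy: str = 'split_and_match'
-- ) -> tuple[List[str], Dict[str, List[str]]]:
--     if strategy == 'match_whole':
--         return identifiers, {id: [id] for id in identifiers}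
--
--     def contributions(identifier):
--         # The keys this one identifier produces, in order (with multiplicity).
--         keys = []
--         if strategy == 'both' or '_' not in identifier:
--             keys.append(identifier)
--         if '_' in identifier and strategy in ('split_and_match', 'both'):
--             keys.extend(c for c in identifier.split('_') if c)
--         return keys
--
--     # Phase 1: the deduplicated expansion is the first occurrences of the flattened keys.
--     result = list(dict.fromkeys(k for i in identifiers for k in contributions(i)))
--     # Phase 2: for each distinct key, collect (per-key scan) the originals producing it.
--     final_mapping = {
--         k: [i for i in identifiers for k2 in contributions(i) if k2 == k]
--         for k in result
--     }
--     return result, final_mapping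
-- ===== Notes on version B (the rewrite author's own statement) =====
-- stated objective: alternative
-- what changed: B factors the task through a pure per-identifier 'contributions' function: the result is a dedup of the flattened contribution lists, and each mapping value is recomputed by a per-key scan over the identifiers, instead of A's incremental defaultdict appends plus a separate seen-set dedup pass.
import Mathlib
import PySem

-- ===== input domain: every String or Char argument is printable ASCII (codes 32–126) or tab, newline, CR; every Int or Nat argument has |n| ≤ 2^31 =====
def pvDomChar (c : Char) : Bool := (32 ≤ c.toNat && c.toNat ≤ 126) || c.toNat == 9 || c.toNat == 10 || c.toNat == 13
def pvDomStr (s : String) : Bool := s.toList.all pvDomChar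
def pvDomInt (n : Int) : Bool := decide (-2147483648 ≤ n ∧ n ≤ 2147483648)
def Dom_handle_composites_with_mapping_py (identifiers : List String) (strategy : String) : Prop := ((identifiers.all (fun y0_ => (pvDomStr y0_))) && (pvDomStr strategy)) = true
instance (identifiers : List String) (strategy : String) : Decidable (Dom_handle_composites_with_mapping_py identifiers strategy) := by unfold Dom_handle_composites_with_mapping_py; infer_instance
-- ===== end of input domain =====

-- B replaces A's incremental defaultdict + second dedup pass by a spec-style two-phase
-- computation from a pure per-identifier contribution function (alternative decomposition).

-- ===== PORT A =====
-- one iteration of A's expansion loop: state = (expanded, mapping).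
-- identifier.split('_') is PySem.Str.split?; the separator is the non-empty literal "_", so
-- split? is never none and .getD [] is unreachable.
def pvA_step (strategy : String)
    (st : List String × PySem.Dict String (List String)) (identifier : String) :
    List String × PySem.Dict String (List String) :=
  let delimiter := "_"
  let st1 :=
    if strategy == "both" || !(PySem.Str.isIn delimiter identifier) then
      (st.1 ++ [identifier], st.2.insert identifier (st.2.getD identifier [] ++ [identifier]))
    else st
  if PySem.Str.isIn delimiter identifier && (strategy == "split_and_match" || strategy == "both") then
    ((PySem.Str.split? identifier delimiter).getD []).foldl
      (fun st component =>
        if component ≠ "" then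
          (st.1 ++ [component], st.2.insert component (st.2.getD component [] ++ [identifier]))
        else st) st1
  else st1

-- one iteration of A's dedup loop: state = (seen, result, final_mapping)
def pvA_dedupStep (mapping : PySem.Dict String (List String))
    (st : PySem.Set String × List String × PySem.Dict String (List String)) (item : String) :
    PySem.Set String × List String × PySem.Dict String (List String) :=
  if !(PySem.Set.contains st.1 item) then
    (PySem.Set.add st.1 item, st.2.1 ++ [item], st.2.2.insert item (mapping.getD item []))
  else st

def handle_composites_with_mapping_py (identifiers : List String) (strategy : String) :
    List String × (List (String × List String)) :=
  if strategy == "match_whole" then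
    (identifiers, (identifiers.foldl (fun d id => d.insert id [id]) PySem.Dict.empty).items)
  else
    let st := identifiers.foldl (pvA_step strategy) ([], PySem.Dict.empty)
    let fin := st.1.foldl (pvA_dedupStep st.2) (PySem.Set.empty, [], PySem.Dict.empty)
    (fin.2.1, fin.2.2.items)

-- ===== PORT B =====
-- B's pure helper: the keys one identifier contributes, in order, with multiplicity
def pvContrib (strategy identifier : String) : List String :=
  (if strategy == "both" || !(PySem.Str.isIn "_" identifier) then [identifier] else []) ++
  (if PySem.Str.isIn "_" identifier && (strategy == "split_and_match" || strategy == "both") then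
    ((PySem.Str.split? identifier "_").getD []).filter (fun c => c ≠ "") else [])

-- B's per-key value: [i for i in identifiers for k2 in contributions(i) if k2 == k]
def pvVal (strategy : String) (identifiers : List String) (k : String) : List String :=
  identifiers.flatMap (fun i => ((pvContrib strategy i).filter (fun k2 => k2 == k)).map (fun _ => i))

def handle_composites_with_mapping_py_alt (identifiers : List String) (strategy : String) :
    List String × (List (String × List String)) :=
  if strategy == "match_whole" then
    (identifiers, (identifiers.foldl (fun d id => d.insert id [id]) PySem.Dict.empty).items)
  else
    let result := PySem.List.dedup (identifiers.flatMap (pvContrib strategy))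
    (result, result.map (fun k => (k, pvVal strategy identifiers k)))

-- ===== PRECONDITION & SPEC =====
def Spec_handle_composites_with_mapping_py (identifiers : List String) (strategy : String) (out : List String × (List (String × List String))) : Prop := out = handle_composites_with_mapping_py_alt identifiers strategy
instance (identifiers : List String) (strategy : String) (out : List String × (List (String × List String))) : Decidable (Spec_handle_composites_with_mapping_py identifiers strategy out) := by unfold Spec_handle_composites_with_mapping_py; infer_instance

-- ===== CLAIM (what is proved, stated in full; the proofs are below) =====
def Claim_equal_handle_composites_with_mapping_py : Prop := ∀ (identifiers : List String) (strategy : String), Dom_handle_composites_with_mapping_py identifiers strategy → Spec_handle_composites_with_mapping_py identifiers strategy (handle_composites_with_mapping_py identifiers strategy)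

-- ===== LEMMAS AND PROOFS =====

-- characterisation of A's inner component fold: it appends the non-empty components to
-- expanded, and appends identifier to mapping[c] once per non-empty component equal to c.
theorem pvCompFold (i : String) (comps : List String) :
    ∀ (e : List String) (m : PySem.Dict String (List String)),
    (comps.foldl
        (fun st component =>
          if component ≠ "" then
            (st.1 ++ [component], st.2.insert component (st.2.getD component [] ++ [i]))
          else st) (e, m)).1 = e ++ comps.filter (fun c => c ≠ "") ∧
    ∀ k, (comps.foldl
        (fun st component =>
          if component ≠ "" then
            (st.1 ++ [component], st.2.insert component (st.2.getD component [] ++ [i]))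
          else st) (e, m)).2.getD k []
      = m.getD k [] ++ (((comps.filter (fun c => c ≠ "")).filter (fun c => c == k)).map (fun _ => i)) := by
  induction comps with
  | nil => intro e m; simp
  | cons c cs ih =>
    intro e m
    by_cases hc : c = ""
    · simpa [hc] using ih e m
    · obtain ⟨ih1, ih2⟩ := ih (e ++ [c]) (m.insert c (m.getD c [] ++ [i]))
      refine ⟨?_, fun k => ?_⟩
      · simp only [List.foldl_cons, hc, ne_eq, not_false_eq_true, if_true]
        rw [ih1]; simp [hc]
      · simp only [List.foldl_cons, hc, ne_eq, not_false_eq_true, if_true]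
        rw [ih2 k, PySem.Dict.getD_insert]
        by_cases hk : k = c
        · subst hk; simp [hc, List.filter_filter]
        · have hck : (c == k) = false := by simpa using fun h => hk h.symm
          simp [hk, hc, hck, List.filter_filter]

-- characterisation of one pvA_step in terms of B's pvContrib
theorem pvStepChar (strategy i : String) (e : List String)
    (m : PySem.Dict String (List String)) :
    (pvA_step strategy (e, m) i).1 = e ++ pvContrib strategy i ∧
    ∀ k, (pvA_step strategy (e, m) i).2.getD k []
      = m.getD k [] ++ ((pvContrib strategy i).filter (fun k2 => k2 == k)).map (fun _ => i) := by
  unfold pvA_step pvContrib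
  cases h1 : (strategy == "both" || !(PySem.Str.isIn "_" i)) <;>
  cases h2 : (PySem.Str.isIn "_" i && (strategy == "split_and_match" || strategy == "both")) <;>
  simp only [h1, h2, Bool.false_eq_true, if_false, if_true, List.nil_append, List.append_nil]
  · exact ⟨by simp, fun k => by simp⟩
  · obtain ⟨c1, c2⟩ := pvCompFold i (((PySem.Str.split? i "_").getD [])) e m
    exact ⟨c1, fun k => c2 k⟩
  · refine ⟨by simp, fun k => ?_⟩
    rw [PySem.Dict.getD_insert]
    by_cases hk : k = i
    · subst hk; simp
    · have hik : (i == k) = false := by simpa using fun h => hk h.symm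
      simp [hk, hik]
  · obtain ⟨c1, c2⟩ := pvCompFold i (((PySem.Str.split? i "_").getD []))
      (e ++ [i]) (m.insert i (m.getD i [] ++ [i]))
    refine ⟨by rw [c1]; simp [List.append_assoc], fun k => ?_⟩
    rw [c2 k, PySem.Dict.getD_insert]
    by_cases hk : k = i
    · subst hk; simp [List.append_assoc]
    · have hik : (i == k) = false := by simpa using fun h => hk h.symm
      simp [hk, hik]

-- characterisation of A's whole expansion loop: expanded is the flattened contributions,
-- and mapping[k] is B's pvVal
theorem pvMainChar (strategy : String) :
    ∀ (ids e : List String) (m : PySem.Dict String (List String)),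
    (ids.foldl (pvA_step strategy) (e, m)).1 = e ++ ids.flatMap (pvContrib strategy) ∧
    ∀ k, (ids.foldl (pvA_step strategy) (e, m)).2.getD k []
      = m.getD k [] ++ pvVal strategy ids k := by
  intro ids
  induction ids with
  | nil => intro e m; simp [pvVal]
  | cons i is ih =>
    intro e m
    obtain ⟨s1, s2⟩ := pvStepChar strategy i e m
    have hA : pvA_step strategy (e, m) i
        = ((pvA_step strategy (e, m) i).1, (pvA_step strategy (e, m) i).2) := rfl
    obtain ⟨ih1, ih2⟩ := ih (pvA_step strategy (e, m) i).1 (pvA_step strategy (e, m) i).2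
    constructor
    · simp only [List.foldl_cons]
      rw [← hA] at ih1
      rw [ih1, s1]; simp [List.flatMap_cons]
    · intro k
      simp only [List.foldl_cons]
      rw [← hA] at ih2
      rw [ih2 k, s2 k]
      simp [pvVal, List.flatMap_cons]

-- characterisation of A's dedup loop: starting from seen = result = r (nodup) and
-- final_mapping with items r.map …, it produces the first occurrences of r ++ e.
theorem pvDedup_fold (m : PySem.Dict String (List String)) :
    ∀ (e r : List String) (f : PySem.Dict String (List String)),
    r.Nodup → f.items = r.map (fun k => (k, m.getD k [])) →
    (e.foldl (pvA_dedupStep m) (r, r, f)).1 = PySem.Set.update r e ∧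
    (e.foldl (pvA_dedupStep m) (r, r, f)).2.1 = PySem.Set.update r e ∧
    (e.foldl (pvA_dedupStep m) (r, r, f)).2.2.items
      = (PySem.Set.update r e).map (fun k => (k, m.getD k [])) := by
  intro e
  induction e with
  | nil => intro r f hr hf; simp [PySem.Set.update, hf]
  | cons a as ih =>
    intro r f hr hf
    have hkeys : f.keys = r := by
      simp [PySem.Dict.keys, hf, List.map_map, Function.comp_def]
    have hupd : PySem.Set.update r (a :: as) = PySem.Set.update (PySem.Set.add r a) as := by
      simp [PySem.Set.update]
    by_cases ha : a ∈ r
    · have hc : PySem.Set.contains r a = true := by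
        simpa [PySem.Set.contains, List.contains_iff_mem] using ha
      have hadd : PySem.Set.add r a = r := by simpa [PySem.Set.add] using ha
      simp only [List.foldl_cons, pvA_dedupStep, hc, Bool.not_true, Bool.false_eq_true,
        if_false]
      rw [hupd, hadd]
      exact ih r f hr hf
    · have hc : PySem.Set.contains r a = false := by
        simpa [PySem.Set.contains, List.contains_iff_mem] using ha
      have hadd : PySem.Set.add r a = r ++ [a] := by simpa [PySem.Set.add] using ha
      have hfc : f.contains a = false := by
        rw [PySem.Dict.contains_eq_decide_mem_keys, hkeys]; simp [ha]
      simp only [List.foldl_cons, pvA_dedupStep, hc, Bool.not_false, if_true]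
      rw [hupd, hadd]
      exact ih (r ++ [a]) (f.insert a (m.getD a []))
        (hr.append (List.nodup_singleton a)
          (fun x hx hxa => ha ((List.mem_singleton.mp hxa) ▸ hx)))
        (by rw [PySem.Dict.items_insert_of_not_contains f _ hfc, hf]; simp)

-- ===== VERDICT (by name: the statement is the Claim_ definition above) =====
theorem handle_composites_with_mapping_py_spec : Claim_equal_handle_composites_with_mapping_py := by
  intro identifiers strategy _
  unfold Spec_handle_composites_with_mapping_py
  unfold handle_composites_with_mapping_py handle_composites_with_mapping_py_alt
  by_cases hs : (strategy == "match_whole") = true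
  · simp [hs]
  · simp only [hs, Bool.false_eq_true, if_false]
    obtain ⟨hE, hM⟩ := pvMainChar strategy identifiers [] PySem.Dict.empty
    set st := identifiers.foldl (pvA_step strategy) ([], PySem.Dict.empty) with hst
    obtain ⟨_, h2, h3⟩ := pvDedup_fold st.2 st.1 [] PySem.Dict.empty List.nodup_nil rfl
    have hupd : PySem.Set.update ([] : List String) st.1 = PySem.Set.ofList st.1 := by
      simp [PySem.Set.update, PySem.Set.ofList_eq_foldl]
    have hE' : st.1 = identifiers.flatMap (pvContrib strategy) := by simpa using hE
    have hM' : ∀ k, st.2.getD k [] = pvVal strategy identifiers k := by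
      intro k; simpa using hM k
    refine Prod.ext ?_ ?_
    · exact h2.trans (hupd.trans (by rw [hE', PySem.List.dedup_eq_ofList]))
    · refine h3.trans ?_
      rw [hupd, hE', PySem.List.dedup_eq_ofList]
      exact List.map_congr_left (fun x _ => by rw [hM' x])
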